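-- pv_equiv track=rewrite | github.com/iamthegreatdestroyer/Nexuszero-Protocol | fix_tests.py | add_missing_imports
-- ===== SOURCE A (Python) =====
-- def add_missing_imports(content):
--     """Add missing imports"""
--     imports_to_add = [
--         'use nexuszero_integration::ValidationErrorCode;',
--         'use nexuszero_integration::optimization::Optimizer;',
--     ]
--
--     # Add after existing imports
--     for import_line in imports_to_add:
--         if import_line not in content:
--             # Find the last use statement
--             lines = content.split('\n')
--             last_use_idx = -1
--             for i, line in enumerate(lines):
--                 if line.strip().startswith('use ') and ';' in line:
--                     last_use_idx = i
--
--             if last_use_idx >= 0: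
--                 lines.insert(last_use_idx + 1, import_line)
--                 content = '\n'.join(lines)
--
--     return content
-- ===== SOURCE B (Python) =====
-- def add_missing_imports(content):
--     """Add missing imports"""
--     imports_to_add = [
--         'use nexuszero_integration::ValidationErrorCode;',
--         'use nexuszero_integration::optimization::Optimizer;',
--     ]
--
--     missing = [imp for imp in imports_to_add if imp not in content]
--     if not missing:
--         return content
--
--     lines = content.split('\n')
--     # scan from the end for the last use statement (early exit)
--     last = None
--     for i, line in enumerate(reversed(lines)):
--         if line.strip().startswith('use ') and ';' in line:
--             last = len(lines) - 1 - i
--             break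
--     if last is None:
--         return content
--
--     lines[last + 1:last + 1] = missing
--     return '\n'.join(lines)
-- ===== Notes on version B (the rewrite author's own statement) =====
-- stated objective: simpler
-- what changed: B computes the missing imports up front and, after one split and one backwards early-exit scan for the last use statement, splices all missing imports in with a single slice assignment, instead of A's per-import re-split, full forward re-scan and re-join of the whole file.
import Mathlib
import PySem

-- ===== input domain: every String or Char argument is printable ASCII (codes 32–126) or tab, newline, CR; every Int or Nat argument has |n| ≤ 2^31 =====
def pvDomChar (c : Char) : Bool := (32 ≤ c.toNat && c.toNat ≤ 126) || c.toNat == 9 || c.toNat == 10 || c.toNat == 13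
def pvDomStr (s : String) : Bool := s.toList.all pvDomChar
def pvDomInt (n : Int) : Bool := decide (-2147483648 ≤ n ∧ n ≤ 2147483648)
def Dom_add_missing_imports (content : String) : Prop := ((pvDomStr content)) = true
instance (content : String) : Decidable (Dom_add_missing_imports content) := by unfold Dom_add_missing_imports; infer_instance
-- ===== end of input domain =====

-- B computes the missing imports up front and, after one split and one backwards early-exit
-- scan for the last `use` statement, splices all missing imports in with a single slice
-- assignment, instead of A's per-import re-split, full forward re-scan and re-join (simpler).

-- ===== PORT A =====
-- the two import lines (module constants of the function, shared by both ports)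
def pvImp1 : List Char := "use nexuszero_integration::ValidationErrorCode;".toList
def pvImp2 : List Char := "use nexuszero_integration::optimization::Optimizer;".toList
def pvImports : List (List Char) := [pvImp1, pvImp2]
-- `line.strip().startswith('use ') and ';' in line` (shared by both ports)
def pvIsUse (line : List Char) : Bool :=
  PySem.Chars.startswith (PySem.Chars.strip line) "use ".toList && PySem.Chars.isIn [';'] line

-- A's forward scan: `for i, line in enumerate(lines): if …: last_use_idx = i`
def pvLastUseIdx (lines : List (List Char)) : Int :=
  (PySem.List.enumerate lines 0).foldl (fun acc p => if pvIsUse p.2 then p.1 else acc) (-1)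

-- one iteration of A's `for import_line in imports_to_add` loop body
def pvAddOne (content : String) (imp : List Char) : String :=
  if PySem.Chars.isIn imp content.toList then content
  else
    let lines := PySem.Chars.splitOn content.toList ['\n']
    let idx := pvLastUseIdx lines
    if 0 ≤ idx then
      String.ofList (PySem.Chars.join ['\n'] (PySem.List.insert lines (idx + 1) imp))
    else content

def add_missing_imports (content : String) : String := pvImports.foldl pvAddOne content

-- ===== PORT B =====
-- B's backwards early-exit scan: first use-line index counted from the end
def pvLastUseFromEnd (lines : List (List Char)) : Option Nat :=
  match lines.reverse.findIdx? pvIsUse with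
  | none => none
  | some j => some (lines.length - 1 - j)

def add_missing_imports_alt (content : String) : String :=
  let missing := pvImports.filter (fun imp => !PySem.Chars.isIn imp content.toList)
  if missing.isEmpty then content
  else
    let lines := PySem.Chars.splitOn content.toList ['\n']
    match pvLastUseFromEnd lines with
    | none => content
    | some k =>
      String.ofList (PySem.Chars.join ['\n'] (lines.take (k + 1) ++ missing ++ lines.drop (k + 1)))

-- ===== PRECONDITION & SPEC =====
def Spec_add_missing_imports (content : String) (out : String) : Prop := out = add_missing_imports_alt content
instance (content : String) (out : String) : Decidable (Spec_add_missing_imports content out) := by unfold Spec_add_missing_imports; infer_instance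

-- ===== CLAIM (what is proved, stated in full; the proofs are below) =====
def Claim_equal_add_missing_imports : Prop := ∀ (content : String), Dom_add_missing_imports content → Spec_add_missing_imports content (add_missing_imports content)

-- ===== LEMMAS AND PROOFS =====

theorem pvGo_spec (c : Char) (fuel : Nat) : ∀ (l cur : List Char) (acc : List (List Char)),
    l.length < fuel →
    PySem.Chars.splitOn.go [c] fuel l cur acc
      = acc.reverse ++ (l.splitOn c).modifyHead (cur.reverse ++ ·) := by
  induction fuel with
  | zero => intro l cur acc h; omega
  | succ fuel ih =>
    intro l cur acc h
    cases l with
    | nil =>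
      simp [PySem.Chars.splitOn.go, List.splitOn, List.splitOnP_nil]
    | cons a rest =>
      rw [PySem.Chars.splitOn.go]
      by_cases hac : a = c
      · subst hac
        have hpre : List.isPrefixOf [a] (a :: rest) = true := by
          simp [List.isPrefixOf]
        rw [if_pos hpre]
        simp only [List.length_singleton, List.drop_one, List.tail_cons]
        rw [ih rest [] (cur.reverse :: acc) (by simpa using Nat.lt_of_succ_lt_succ h)]
        simp [List.splitOn, List.splitOnP_cons]
        exact congrFun List.modifyHead_id _
      · have hpre : List.isPrefixOf [c] (a :: rest) = false := by
          simp [List.isPrefixOf]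
          intro hh; exact absurd hh.symm hac
        rw [if_neg (by simp [hpre])]
        rw [ih rest (a :: cur) acc (by simpa using Nat.lt_of_succ_lt_succ h)]
        simp only [List.splitOn, List.splitOnP_cons, beq_iff_eq, hac, if_false]
        congr 1
        have : (List.splitOnP (· == c) rest) ≠ [] := List.splitOnP_ne_nil _ _
        obtain ⟨p, ps, hp⟩ := List.exists_cons_of_ne_nil this
        rw [hp]
        simp

theorem pvSplitOn_eq (cs : List Char) (c : Char) :
    PySem.Chars.splitOn cs [c] = cs.splitOn c := by
  rw [PySem.Chars.splitOn, pvGo_spec c (cs.length + 1) cs [] [] (by omega)]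
  simp
  exact congrFun List.modifyHead_id _

theorem pvNoSep (c : Char) (cs : List Char) : ∀ q ∈ cs.splitOn c, c ∉ q := by
  induction cs with
  | nil => simp [List.splitOn, List.splitOnP_nil]
  | cons a rest ih =>
    intro q hq
    rw [List.splitOn, List.splitOnP_cons] at hq
    by_cases hac : a = c
    · subst hac
      simp at hq
      rcases hq with h | h
      · simp [h]
      · exact ih q h
    · rw [if_neg (by simp [hac])] at hq
      obtain ⟨p, ps, hp⟩ := List.exists_cons_of_ne_nil (List.splitOnP_ne_nil (· == c) rest)
      rw [hp] at hq
      simp at hq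
      rcases hq with h | h
      · subst h
        intro hmem
        rcases List.mem_cons.mp hmem with h | h
        · exact hac h.symm
        · exact ih p (by rw [List.splitOn, hp]; simp) h
      · exact ih q (by rw [List.splitOn, hp]; simp [h])


theorem pvIdx_append (ls : List (List Char)) (l : List Char) :
    pvLastUseIdx (ls ++ [l]) = if pvIsUse l then (ls.length : Int) else pvLastUseIdx ls := by
  unfold pvLastUseIdx
  rw [PySem.List.enumerate_append, List.foldl_append]
  simp [PySem.List.enumerate]

theorem pvEnd_append (ls : List (List Char)) (l : List Char) :
    pvLastUseFromEnd (ls ++ [l]) = if pvIsUse l then some ls.length else pvLastUseFromEnd ls := by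
  unfold pvLastUseFromEnd
  rw [List.reverse_append]
  simp only [List.reverse_singleton, List.singleton_append, List.findIdx?_cons]
  by_cases hu : pvIsUse l
  · simp [hu]
  · simp only [hu]
    cases hj : ls.reverse.findIdx? pvIsUse with
    | none => simp
    | some j =>
      have hjl : j < ls.length := by
        have := List.findIdx?_eq_some_iff_findIdx_eq.mp hj
        simpa using this.1
      simp only [Option.map_some]
      simp only [List.length_append, List.length_singleton]

      simp
      omega

theorem pvIdx_eq_end (ls : List (List Char)) :
    pvLastUseIdx ls = (pvLastUseFromEnd ls).elim (-1) (fun k => (k : Int)) := by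
  induction ls using List.reverseRecOn with
  | nil => rfl
  | append_singleton ls l ih =>
    rw [pvIdx_append, pvEnd_append]
    by_cases hu : pvIsUse l
    · simp [hu]
    · simp [hu, ih]

theorem pvEnd_lt (ls : List (List Char)) (k : Nat) (h : pvLastUseFromEnd ls = some k) :
    k < ls.length := by
  induction ls using List.reverseRecOn generalizing k with
  | nil => simp [pvLastUseFromEnd] at h
  | append_singleton ls l ih =>
    rw [pvEnd_append] at h
    by_cases hu : pvIsUse l
    · simp [hu] at h
      simp [← h]
    · simp only [hu] at h
      have := ih k h
      simp
      omega

theorem pvEnd_last (ls : List (List Char)) (k : Nat) (h : pvLastUseFromEnd ls = some k) :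
    ∀ q ∈ ls.drop (k + 1), pvIsUse q = false := by
  induction ls using List.reverseRecOn generalizing k with
  | nil => simp
  | append_singleton ls l ih =>
    rw [pvEnd_append] at h
    by_cases hu : pvIsUse l
    · simp [hu] at h
      subst h
      simp
    · simp only [hu] at h
      have hk := pvEnd_lt ls k h
      rw [List.drop_append_of_le_length (by omega)]
      intro q hq
      rcases List.mem_append.mp hq with hql | hql
      · exact ih k h q hql
      · simp at hql
        subst hql
        simpa using hu

theorem pvEnd_build (pre suf : List (List Char)) (x : List Char)
    (hx : pvIsUse x = true) (hs : ∀ q ∈ suf, pvIsUse q = false) :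
    pvLastUseFromEnd (pre ++ x :: suf) = some pre.length := by
  induction suf using List.reverseRecOn with
  | nil =>
    rw [show pre ++ [x] = pre ++ [x] from rfl, pvEnd_append]
    simp [hx]
  | append_singleton suf q ih =>
    rw [show pre ++ x :: (suf ++ [q]) = (pre ++ x :: suf) ++ [q] by simp, pvEnd_append]
    rw [if_neg (by simp [hs q (by simp)])]
    exact ih (fun r hr => hs r (by simp [hr]))

theorem pvInfix_split (p xs ys : List Char) (c : Char) (hc : c ∉ p)
    (h : p <:+: xs ++ c :: ys) : p <:+: xs ∨ p <:+: ys := by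
  obtain ⟨s, t, hst⟩ := h
  by_cases h1 : s.length + p.length ≤ xs.length
  · left
    have hpre : (s ++ p) <+: xs ++ c :: ys := ⟨t, by simpa [List.append_assoc] using hst⟩
    have hxs : (s ++ p) <+: xs :=
      List.prefix_of_prefix_length_le hpre (List.prefix_append xs (c :: ys))
        (by simpa using h1)
    obtain ⟨t', ht'⟩ := hxs
    exact ⟨s, t', by simpa [List.append_assoc] using ht'⟩
  · by_cases h2 : xs.length + 1 ≤ s.length
    · right
      have hst' : s ++ (p ++ t) = xs ++ c :: ys := by simpa [List.append_assoc] using hst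
      have := congrArg (List.drop (xs.length + 1)) hst'
      rw [List.drop_append_of_le_length h2, List.drop_append] at this
      rw [show List.drop (xs.length + 1) xs = [] from List.drop_eq_nil_of_le (by omega),
        List.nil_append] at this
      exact ⟨s.drop (xs.length + 1), t, by simpa [List.append_assoc] using this⟩
    · exfalso
      have hsle : s.length ≤ xs.length := by omega
      have hi : xs.length - s.length < p.length := by omega
      have hst' : s ++ (p ++ t) = xs ++ c :: ys := by simpa [List.append_assoc] using hst
      have hlen : xs.length < (s ++ (p ++ t)).length := by rw [hst']; simp
      have e2 : (s ++ (p ++ t))[xs.length]'hlen = p[xs.length - s.length]'hi := by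
        rw [List.getElem_append_right (by omega)]
        rw [List.getElem_append_left hi]
      have e1 : (s ++ (p ++ t))[xs.length]'hlen = c := by
        rw [List.getElem_of_eq hst']
        rw [List.getElem_append_right (by omega)]
        simp
      exact hc (e1 ▸ e2 ▸ List.getElem_mem hi)

theorem pvInfix_join_piece (sep q : List Char) (parts : List (List Char)) (hq : q ∈ parts) :
    q <:+: PySem.Chars.join sep parts := by
  induction parts with
  | nil => simp at hq
  | cons a rest ih =>
    cases rest with
    | nil =>
      simp at hq
      subst hq
      simp [PySem.Chars.join_singleton]
    | cons b rest2 =>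
      rw [PySem.Chars.join_cons_cons]
      rcases List.mem_cons.mp hq with h | h
      · subst h
        rw [List.append_assoc]
        exact (List.prefix_append q _).isInfix
      · exact (ih h).trans (List.suffix_append _ _).isInfix

theorem pvInfix_join (p : List Char) (c : Char) (parts : List (List Char))
    (hp : p ≠ []) (hc : c ∉ p) :
    p <:+: PySem.Chars.join [c] parts ↔ ∃ q ∈ parts, p <:+: q := by
  constructor
  · intro h
    induction parts with
    | nil =>
      rw [PySem.Chars.join_nil] at h
      exact absurd (List.eq_nil_of_infix_nil h) hp
    | cons a rest ih =>
      cases rest with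
      | nil =>
        rw [PySem.Chars.join_singleton] at h
        exact ⟨a, by simp, h⟩
      | cons b rest2 =>
        rw [PySem.Chars.join_cons_cons] at h
        rw [List.append_assoc, List.singleton_append] at h
        rcases pvInfix_split p a _ c hc h with h' | h'
        · exact ⟨a, by simp, h'⟩
        · obtain ⟨q, hq1, hq2⟩ := ih h'
          exact ⟨q, by simp [hq1], hq2⟩
  · rintro ⟨q, hq1, hq2⟩
    exact hq2.trans (pvInfix_join_piece [c] q parts hq1)

-- step evaluations of A's loop body
theorem pvAddOne_present (content : String) (imp : List Char)
    (h : PySem.Chars.isIn imp content.toList = true) : pvAddOne content imp = content := by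
  simp [pvAddOne, h]

theorem pvAddOne_noUse (content : String) (imp : List Char)
    (hL : pvLastUseFromEnd (PySem.Chars.splitOn content.toList ['\n']) = none) :
    pvAddOne content imp = content := by
  have hidx : pvLastUseIdx (PySem.Chars.splitOn content.toList ['\n']) = -1 := by
    rw [pvIdx_eq_end, hL]; rfl
  unfold pvAddOne
  by_cases h : PySem.Chars.isIn imp content.toList = true
  · rw [if_pos h]
  · rw [if_neg h]
    simp only [hidx]
    norm_num

theorem pvAddOne_insert (content : String) (imp : List Char) (k : Nat)
    (h : PySem.Chars.isIn imp content.toList = false)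
    (hL : pvLastUseFromEnd (PySem.Chars.splitOn content.toList ['\n']) = some k) :
    pvAddOne content imp = String.ofList (PySem.Chars.join ['\n']
      ((PySem.Chars.splitOn content.toList ['\n']).take (k+1) ++ imp ::
       (PySem.Chars.splitOn content.toList ['\n']).drop (k+1))) := by
  have hk := pvEnd_lt _ _ hL
  have hidx : pvLastUseIdx (PySem.Chars.splitOn content.toList ['\n']) = (k : Int) := by
    rw [pvIdx_eq_end, hL]; rfl
  unfold pvAddOne
  rw [if_neg (by simp [h])]
  simp only [hidx]
  rw [if_pos (by positivity)]
  congr 1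
  rw [show (k : Int) + 1 = ((k + 1 : Nat) : Int) by push_cast; ring]
  rw [PySem.List.insert_natCast _ _ _ (by omega)]

-- facts about the two import lines
theorem pvImp1_use : pvIsUse pvImp1 = true := by decide
theorem pvImp1_noNl : ('\n') ∉ pvImp1 := by decide
theorem pvImp2_noNl : ('\n') ∉ pvImp2 := by decide
theorem pvImp2_ne_nil : pvImp2 ≠ [] := by decide
theorem pvImp2_not_in_imp1 : ¬ pvImp2 <:+: pvImp1 := by decide

theorem pvMain (content : String) :
    add_missing_imports content = add_missing_imports_alt content := by
  have hjoin : PySem.Chars.join ['\n'] (PySem.Chars.splitOn content.toList ['\n']) = content.toList := by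
    rw [pvSplitOn_eq]
    exact List.intercalate_splitOn content.toList '\n'
  have hnl : ∀ q ∈ PySem.Chars.splitOn content.toList ['\n'], ('\n') ∉ q := by
    rw [pvSplitOn_eq]; exact pvNoSep '\n' content.toList
  rw [show add_missing_imports content = pvAddOne (pvAddOne content pvImp1) pvImp2 from rfl]
  by_cases h1 : PySem.Chars.isIn pvImp1 content.toList = true
  · -- first import already present: A's first step is the identity
    rw [pvAddOne_present content pvImp1 h1]
    by_cases h2 : PySem.Chars.isIn pvImp2 content.toList = true
    · rw [pvAddOne_present content pvImp2 h2]
      simp [add_missing_imports_alt, pvImports, h1, h2]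
    · replace h2 : PySem.Chars.isIn pvImp2 content.toList = false := by simpa using h2
      cases hL : pvLastUseFromEnd (PySem.Chars.splitOn content.toList ['\n']) with
      | none =>
        rw [pvAddOne_noUse content pvImp2 hL]
        simp [add_missing_imports_alt, pvImports, h1, h2, hL]
      | some k =>
        rw [pvAddOne_insert content pvImp2 k h2 hL]
        simp [add_missing_imports_alt, pvImports, h1, h2, hL]
  · replace h1 : PySem.Chars.isIn pvImp1 content.toList = false := by simpa using h1
    cases hL : pvLastUseFromEnd (PySem.Chars.splitOn content.toList ['\n']) with
    | none =>
      rw [pvAddOne_noUse content pvImp1 hL, pvAddOne_noUse content _ hL]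
      simp [add_missing_imports_alt, pvImports, hL]
    | some k =>
      have hk := pvEnd_lt _ _ hL
      have hlast := pvEnd_last _ _ hL
      rw [pvAddOne_insert content pvImp1 k h1 hL]
      -- names for the pieces
      set Ls := PySem.Chars.splitOn content.toList ['\n'] with hLs
      set pre := Ls.take (k+1) with hpre
      set suf := Ls.drop (k+1) with hsuf
      have hpre_len : pre.length = k + 1 := by
        rw [hpre, List.length_take]; omega
      have hL1_no_nl : ∀ q ∈ pre ++ pvImp1 :: suf, ('\n') ∉ q := by
        intro q hq
        rcases List.mem_append.mp hq with h | h
        · exact hnl q (List.mem_of_mem_take h)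
        · rcases List.mem_cons.mp h with h | h
          · subst h; exact pvImp1_noNl
          · exact hnl q (List.mem_of_mem_drop h)
      have htl : (String.ofList (PySem.Chars.join ['\n'] (pre ++ pvImp1 :: suf))).toList
          = PySem.Chars.join ['\n'] (pre ++ pvImp1 :: suf) := String.toList_ofList
      have hsplit1 : PySem.Chars.splitOn (PySem.Chars.join ['\n'] (pre ++ pvImp1 :: suf)) ['\n']
          = pre ++ pvImp1 :: suf := by
        rw [pvSplitOn_eq]
        exact List.splitOn_intercalate _ '\n' hL1_no_nl (by simp)
      have hmem_L1 : ∀ q, q ∈ pre ++ pvImp1 :: suf ↔ (q = pvImp1 ∨ q ∈ Ls) := by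
        intro q
        constructor
        · intro hq
          rcases List.mem_append.mp hq with h | h
          · exact Or.inr (List.mem_of_mem_take h)
          · rcases List.mem_cons.mp h with h | h
            · exact Or.inl h
            · exact Or.inr (List.mem_of_mem_drop h)
        · intro hq
          rcases hq with h | h
          · subst h; exact List.mem_append.mpr (Or.inr (List.mem_cons_self))
          · rw [← List.take_append_drop (k+1) Ls] at h
            rcases List.mem_append.mp h with h | h
            · exact List.mem_append.mpr (Or.inl h)
            · exact List.mem_append.mpr (Or.inr (List.mem_cons_of_mem _ h))
      have hin1_iff : ∀ p, p ≠ [] → ('\n') ∉ p → ¬ p <:+: pvImp1 →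
          (PySem.Chars.isIn p (PySem.Chars.join ['\n'] (pre ++ pvImp1 :: suf)) =
           PySem.Chars.isIn p content.toList) := by
        intro p hp hcnl hnp
        by_cases hin : PySem.Chars.isIn p content.toList = true
        · rw [hin]
          rw [PySem.Chars.isIn_iff_infix]
          have := (pvInfix_join p '\n' Ls hp hcnl).mp
            (by rw [hLs, hjoin]; exact (PySem.Chars.isIn_iff_infix _ _).mp hin)
          obtain ⟨q, hq1, hq2⟩ := this
          exact (pvInfix_join p '\n' _ hp hcnl).mpr ⟨q, (hmem_L1 q).mpr (Or.inr hq1), hq2⟩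
        · replace hin : PySem.Chars.isIn p content.toList = false := by simpa using hin
          rw [hin, ← Bool.not_eq_true, PySem.Chars.isIn_iff_infix]
          intro hinf
          obtain ⟨q, hq1, hq2⟩ := (pvInfix_join p '\n' _ hp hcnl).mp hinf
          rcases (hmem_L1 q).mp hq1 with h | h
          · subst h; exact hnp hq2
          · have : p <:+: PySem.Chars.join ['\n'] Ls := (pvInfix_join p '\n' Ls hp hcnl).mpr ⟨q, h, hq2⟩
            rw [hLs, hjoin] at this
            rw [← Bool.not_eq_true, PySem.Chars.isIn_iff_infix] at hin
            exact hin this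
      by_cases h2 : PySem.Chars.isIn pvImp2 content.toList = true
      · -- second import already present: A's second step is the identity
        rw [pvAddOne_present _ pvImp2 (by
          rw [htl, hin1_iff pvImp2 pvImp2_ne_nil pvImp2_noNl pvImp2_not_in_imp1]; exact h2)]
        simp [add_missing_imports_alt, pvImports, h1, h2, ← hLs, hL, hpre, hsuf]
      · replace h2 : PySem.Chars.isIn pvImp2 content.toList = false := by simpa using h2
        have hL1 : pvLastUseFromEnd (pre ++ pvImp1 :: suf) = some (k + 1) := by
          rw [pvEnd_build pre suf pvImp1 pvImp1_use hlast, hpre_len]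
        rw [pvAddOne_insert _ pvImp2 (k+1) (by
            rw [htl, hin1_iff pvImp2 pvImp2_ne_nil pvImp2_noNl pvImp2_not_in_imp1]; exact h2)
          (by rw [htl, hsplit1]; exact hL1)]
        rw [htl, hsplit1]
        have htake : (pre ++ pvImp1 :: suf).take (k+1+1) = pre ++ [pvImp1] := by
          rw [List.take_append, List.take_of_length_le (by omega)]
          congr 1
          rw [hpre_len, show k + 1 + 1 - (k+1) = 1 by omega]
          simp
        have hdrop : (pre ++ pvImp1 :: suf).drop (k+1+1) = suf := by
          rw [List.drop_append, List.drop_eq_nil_of_le (by omega)]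
          rw [hpre_len, show k + 1 + 1 - (k+1) = 1 by omega]
          simp
        rw [htake, hdrop]
        simp [add_missing_imports_alt, pvImports, h1, h2, ← hLs, hL, hpre, hsuf, List.append_assoc]

-- ===== VERDICT (by name: the statement is the Claim_ definition above) =====
theorem add_missing_imports_spec : Claim_equal_add_missing_imports := by
  intro content _
  unfold Spec_add_missing_imports
  exact pvMain content
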